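-- pv_equiv track=rewrite | github.com/udayhacks/leetcode | Intersection of two arrays.py | NumberofElementsInIntersection
-- ===== SOURCE A (Python) =====
-- def NumberofElementsInIntersection(a, b, n, m):
--     #return: expected length of the intersection array.
--
--     d ={}
--     c = 0
--
--     for i in range(len(a)) :
--
--         d[a[i]]  = i
--
--
--
--     for i in range(len(b)) :
--
--
--         if b[i]  in d :
--             c +=1
--     return c
-- ===== SOURCE B (Python) =====
-- def NumberofElementsInIntersection(a, b, n, m):
--     # B: sort a copy of a once, then binary-search (bisect_left, hand-written
--     # since A imports nothing) each element of b against it; alternative to A's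
--     # hash-map membership, same return value.
--     sa = sorted(a)
--     c = 0
--     for x in b:
--         lo, hi = 0, len(sa)
--         while lo < hi:
--             mid = (lo + hi) // 2
--             if sa[mid] < x:
--                 lo = mid + 1
--             else:
--                 hi = mid
--         if lo < len(sa) and sa[lo] == x:
--             c += 1
--     return c
-- ===== Notes on version B (the rewrite author's own statement) =====
-- stated objective: alternative
-- what changed: Replaces A's hash-map build plus index-loop membership count with sorting a once and probing it by hand-written binary search (bisect_left) for each element of b.
import Mathlib
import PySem

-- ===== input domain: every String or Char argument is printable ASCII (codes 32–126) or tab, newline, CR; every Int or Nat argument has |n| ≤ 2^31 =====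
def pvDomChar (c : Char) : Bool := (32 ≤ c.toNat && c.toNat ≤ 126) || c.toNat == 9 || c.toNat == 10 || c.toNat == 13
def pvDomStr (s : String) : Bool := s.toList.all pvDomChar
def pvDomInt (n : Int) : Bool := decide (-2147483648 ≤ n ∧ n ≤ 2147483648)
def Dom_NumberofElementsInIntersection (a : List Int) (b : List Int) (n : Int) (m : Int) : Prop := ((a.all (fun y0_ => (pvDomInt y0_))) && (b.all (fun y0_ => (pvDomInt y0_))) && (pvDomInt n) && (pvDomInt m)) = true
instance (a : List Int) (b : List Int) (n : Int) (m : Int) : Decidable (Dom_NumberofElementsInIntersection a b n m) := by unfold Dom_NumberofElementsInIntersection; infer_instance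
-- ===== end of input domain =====

-- ===== PORT A =====
-- A: build a dict from elements of a to their indices, then count elements of b present in it.
def NumberofElementsInIntersection (a : List Int) (b : List Int) (n : Int) (m : Int) : Int :=
  let d : PySem.Dict Int Int :=
    (PySem.List.pyRange 0 a.length 1).foldl
      (fun d i => d.insert (PySem.List.pyGetD a i 0) i) PySem.Dict.empty
  (PySem.List.pyRange 0 b.length 1).foldl
    (fun c i => if d.contains (PySem.List.pyGetD b i 0) then c + 1 else c) (0 : Int)

-- ===== PORT B =====
-- B-side helper: the hand-written bisect_left while-loop of Source B (lo/hi binary search).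
def pvBisectLoop (sa : List Int) (x : Int) (lo hi : Nat) : Nat :=
  if _h : lo < hi then
    let mid := (lo + hi) / 2
    if PySem.List.pyGetD sa (mid : Int) 0 < x then pvBisectLoop sa x (mid + 1) hi
    else pvBisectLoop sa x lo mid
  else lo
termination_by hi - lo
decreasing_by all_goals omega

-- B: sort a once, binary-search each element of b against the sorted copy.
def NumberofElementsInIntersection_alt (a : List Int) (b : List Int) (n : Int) (m : Int) : Int :=
  let sa := PySem.List.sorted a (fun x => x) false
  b.foldl
    (fun c x =>
      let lo := pvBisectLoop sa x 0 sa.length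
      if lo < sa.length ∧ PySem.List.pyGetD sa (lo : Int) 0 = x then c + 1 else c) (0 : Int)

-- ===== PRECONDITION & SPEC =====
def Spec_NumberofElementsInIntersection (a : List Int) (b : List Int) (n : Int) (m : Int) (out : Int) : Prop := out = NumberofElementsInIntersection_alt a b n m
instance (a : List Int) (b : List Int) (n : Int) (m : Int) (out : Int) : Decidable (Spec_NumberofElementsInIntersection a b n m out) := by unfold Spec_NumberofElementsInIntersection; infer_instance

-- ===== CLAIM (what is proved, stated in full; the proofs are below) =====
def Claim_equal_NumberofElementsInIntersection : Prop := ∀ (a : List Int) (b : List Int) (n : Int) (m : Int), Dom_NumberofElementsInIntersection a b n m → Spec_NumberofElementsInIntersection a b n m (NumberofElementsInIntersection a b n m)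

-- ===== LEMMAS AND PROOFS =====

-- A's dict, restricted to key membership, remembers exactly the keys inserted so far.
lemma pv_contains_foldl_insert (a : List Int) (l : List Int) (d : PySem.Dict Int Int) (x : Int) :
    (l.foldl (fun d i => d.insert (PySem.List.pyGetD a i 0) i) d).contains x
      = (d.contains x || decide (x ∈ l.map (fun i => PySem.List.pyGetD a i 0))) := by
  induction l generalizing d with
  | nil => simp
  | cons i t ih =>
      simp only [List.foldl_cons, ih, List.map_cons, List.mem_cons,
        PySem.Dict.contains_insert]
      by_cases hx : x = PySem.List.pyGetD a i 0
      · simp [hx]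
      · have hb : (x == PySem.List.pyGetD a i 0) = false := by
          simpa using hx
        simp [hx, hb]

-- the binary-search loop invariant: everything left of the result is < x, everything from it on is ≥ x
lemma pvBisectLoop_spec (sa : List Int) (x : Int) (hs : sa.Pairwise (· ≤ ·)) :
    ∀ k lo hi, hi - lo = k → lo ≤ hi → hi ≤ sa.length →
    (∀ j (hj : j < sa.length), j < lo → sa[j] < x) →
    (∀ j (hj : j < sa.length), hi ≤ j → x ≤ sa[j]) →
    lo ≤ pvBisectLoop sa x lo hi ∧ pvBisectLoop sa x lo hi ≤ hi ∧
    (∀ j (hj : j < sa.length), j < pvBisectLoop sa x lo hi → sa[j] < x) ∧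
    (∀ j (hj : j < sa.length), pvBisectLoop sa x lo hi ≤ j → x ≤ sa[j]) := by
  intro k
  induction k using Nat.strong_induction_on with
  | _ k ih =>
    intro lo hi hk hlo hhi hL hR
    have hmono := List.pairwise_iff_getElem.mp hs
    by_cases h : lo < hi
    · have hmid : (lo + hi) / 2 < sa.length := by omega
      have hget : PySem.List.pyGetD sa (((lo + hi) / 2 : Nat) : Int) 0 = sa[(lo + hi) / 2] := by
        simpa using PySem.List.pyGetD_ofNat (xs := sa) (n := (lo + hi) / 2) (d := 0) hmid
      rw [pvBisectLoop]
      simp only [h, dif_pos]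
      by_cases hc : PySem.List.pyGetD sa (((lo + hi) / 2 : Nat) : Int) 0 < x
      · rw [if_pos hc]
        have hL' : ∀ j (hj : j < sa.length), j < (lo + hi) / 2 + 1 → sa[j] < x := by
          intro j hj hjlt
          rcases Nat.lt_or_ge j ((lo + hi) / 2) with hd | hd
          · exact lt_of_le_of_lt (hmono j _ hj hmid hd) (hget ▸ hc)
          · have : j = (lo + hi) / 2 := by omega
            subst this; exact hget ▸ hc
        obtain ⟨h1, h2, h3, h4⟩ := ih (hi - ((lo + hi) / 2 + 1)) (by omega) _ _ rfl (by omega) hhi hL' hR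
        exact ⟨by omega, h2, h3, h4⟩
      · rw [if_neg hc]
        rw [not_lt] at hc
        rw [hget] at hc
        have hR' : ∀ j (hj : j < sa.length), (lo + hi) / 2 ≤ j → x ≤ sa[j] := by
          intro j hj hjge
          refine le_trans hc ?_
          rcases Nat.lt_or_ge ((lo + hi) / 2) j with hd | hd
          · exact hmono _ j hmid hj hd
          · have : j = (lo + hi) / 2 := by omega
            subst this; exact le_refl _
        obtain ⟨h1, h2, h3, h4⟩ := ih ((lo + hi) / 2 - lo) (by omega) _ _ rfl (by omega) (by omega) hL hR'
        exact ⟨h1, by omega, h3, h4⟩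
    · rw [pvBisectLoop]
      simp only [h, dif_neg, not_false_iff]
      exact ⟨le_refl _, by omega, hL, fun j hj hjge => hR j hj (by omega)⟩

-- the binary-search hit test decides membership in the sorted list
lemma pvBisect_mem (sa : List Int) (x : Int) (hs : sa.Pairwise (· ≤ ·)) :
    (pvBisectLoop sa x 0 sa.length < sa.length ∧
      PySem.List.pyGetD sa ((pvBisectLoop sa x 0 sa.length : Nat) : Int) 0 = x) ↔ x ∈ sa := by
  obtain ⟨h1, h2, h3, h4⟩ := pvBisectLoop_spec sa x hs (sa.length - 0) 0 sa.length rfl (Nat.zero_le _) (le_refl _)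
    (by omega) (by omega)
  set r := pvBisectLoop sa x 0 sa.length with hr
  constructor
  · rintro ⟨hlt, heq⟩
    have : PySem.List.pyGetD sa (r : Int) 0 = sa[r] := by
      simpa using PySem.List.pyGetD_ofNat (xs := sa) (n := r) (d := 0) hlt
    rw [this] at heq
    exact heq ▸ List.getElem_mem hlt
  · intro hmem
    obtain ⟨j, hj, hje⟩ := List.mem_iff_getElem.mp hmem
    have hjr : r ≤ j := by
      by_contra hcon
      have := h3 j hj (by omega)
      omega
    have hrlt : r < sa.length := by omega
    have hxle : x ≤ sa[r] := h4 r hrlt (le_refl _)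
    have hmono := List.pairwise_iff_getElem.mp hs
    have hle2 : sa[r] ≤ x := by
      rcases Nat.lt_or_ge r j with hc | hc
      · exact hje ▸ hmono r j hrlt hj hc
      · have : r = j := by omega
        exact this ▸ hje ▸ le_refl _
    have hget : PySem.List.pyGetD sa (r : Int) 0 = sa[r] := by
      simpa using PySem.List.pyGetD_ofNat (xs := sa) (n := r) (d := 0) hrlt
    exact ⟨hrlt, by rw [hget]; omega⟩

-- ===== VERDICT (by name: the statement is the Claim_ definition above) =====
theorem NumberofElementsInIntersection_spec : Claim_equal_NumberofElementsInIntersection := by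
  intro a b n m _hdom
  unfold Spec_NumberofElementsInIntersection NumberofElementsInIntersection NumberofElementsInIntersection_alt
  simp only []
  set sa := PySem.List.sorted a (fun x => x) false with hsa
  have hs : sa.Pairwise (· ≤ ·) := by
    simpa using PySem.List.sorted_pairwise a (fun x => x)
  set d : PySem.Dict Int Int :=
    (PySem.List.pyRange 0 a.length 1).foldl
      (fun d i => d.insert (PySem.List.pyGetD a i 0) i) PySem.Dict.empty with hd
  have hcont : ∀ x : Int, d.contains x = decide (x ∈ a) := by
    intro x
    rw [hd, pv_contains_foldl_insert]
    have hmap : (PySem.List.pyRange 0 a.length 1).map (fun i => PySem.List.pyGetD a i 0) = a := by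
      simpa using PySem.List.map_pyGetD_pyRange_zero a 0
    simp [hmap]
  rw [PySem.List.foldl_pyRange_zero_pyGetD' b 0 (fun c y => if d.contains y then c + 1 else c) 0]
  rw [PySem.List.foldl_count_if (fun y => d.contains y) b 0]
  rw [PySem.List.foldl_ite_add_one
    (fun x => pvBisectLoop sa x 0 sa.length < sa.length ∧
      PySem.List.pyGetD sa ((pvBisectLoop sa x 0 sa.length : Nat) : Int) 0 = x) b 0]
  congr 1
  norm_cast
  refine List.countP_congr ?_
  intro x _hx
  have h1 := pvBisect_mem sa x hs
  have h2 : x ∈ sa ↔ x ∈ a := PySem.List.mem_sorted a (fun y => y) false x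
  rw [hcont x]
  simp only [decide_eq_true_eq]
  exact (h1.trans h2).symm
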